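-- pv_equiv track=rewrite | github.com/humanitarian-data-collaboration/hxl-tag-api | api/server.py | check_mapping
-- ===== SOURCE A (Python) =====
-- def check_mapping(header, predicted_tag):
--     MAPPINGS = {
--     "#geo" : ['lon', 'lat', 'latitude', 'longitude'], #words that would likely appear for #geo tag
--     "#admin" : ['county'], #words that would likely appear for #admin tag
--     "#country" :  ['country'], #words that would likely appear for #country tag
--     "#date" : ['year', 'date'], #words that would likely appear for #date tag
--     "#funding": ['funding', 'funded'], #words that would likely appear for #funding tag
--     "#value": ['percentfunded'], #words that would likely appear for #value tag
--     "#org":['organization', 'funder ref', 'org'], #words that would likely appear for #org tag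
--     "#status":['status'], #words that would likely appear for #status tag
--     "#sector":['sector'], #words that would likely appear for #sector tag
--     "#adm1":['adm1', 'admin1'], #words that would likely appear for #adm1 tag
--     "#adm2":['adm2', 'admin2'], #words that would likely appear for #adm2 tag
--     "#adm3":['adm3', 'admin3'], #words that would likely appear for #adm3 tag
--     "#adm4":['adm4', 'admin4']  #words that would likely appear for #adm4 tag
--     }
--     change_tag = False
--     header_words = header.split()
--     for key, val in MAPPINGS.items():
--         for word in header_words:
--             #check if the header contains any of the words in the mappings (substrings are not included)
--             if (word in val):
--                 if (predicted_tag != key):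
--                     predicted_tag = key
--                     change_tag = True
--     return change_tag, predicted_tag
-- ===== SOURCE B (Python) =====
-- def check_mapping(header, predicted_tag):
--     MAPPINGS = {
--     "#geo" : ['lon', 'lat', 'latitude', 'longitude'],
--     "#admin" : ['county'],
--     "#country" :  ['country'],
--     "#date" : ['year', 'date'],
--     "#funding": ['funding', 'funded'],
--     "#value": ['percentfunded'],
--     "#org":['organization', 'funder ref', 'org'],
--     "#status":['status'],
--     "#sector":['sector'],
--     "#adm1":['adm1', 'admin1'],
--     "#adm2":['adm2', 'admin2'],
--     "#adm3":['adm3', 'admin3'],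
--     "#adm4":['adm4', 'admin4']
--     }
--     words = header.split()
--     matched = [key for key, val in MAPPINGS.items() if any(w in val for w in words)]
--     if not matched:
--         return False, predicted_tag
--     return len(matched) >= 2 or matched[0] != predicted_tag, matched[-1]
-- ===== Notes on version B (the rewrite author's own statement) =====
-- stated objective: simpler
-- what changed: B replaces A's interleaved in-place tag mutation and flag bookkeeping with a detect-then-decide decomposition: it first builds the list of matched mapping keys in table order, then reads the final tag off the last element and the change flag off the list's length and first element.
import Mathlib
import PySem

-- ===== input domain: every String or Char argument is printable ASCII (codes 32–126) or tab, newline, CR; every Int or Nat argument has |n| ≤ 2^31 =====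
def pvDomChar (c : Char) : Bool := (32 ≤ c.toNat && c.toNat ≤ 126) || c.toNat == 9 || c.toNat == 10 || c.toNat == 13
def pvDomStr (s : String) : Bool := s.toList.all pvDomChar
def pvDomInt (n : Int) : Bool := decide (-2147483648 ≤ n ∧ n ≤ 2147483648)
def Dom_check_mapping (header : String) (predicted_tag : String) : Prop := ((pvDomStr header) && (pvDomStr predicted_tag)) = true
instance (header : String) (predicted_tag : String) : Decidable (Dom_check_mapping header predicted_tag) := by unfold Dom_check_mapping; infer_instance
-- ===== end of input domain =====

-- B replaces A's interleaved mutate-and-flag scan by a detect-then-decide decomposition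
-- (build the list of matched keys first, then derive tag and flag from it); objective: simpler.


-- The MAPPINGS table (a dict literal in Python; association list in insertion order).
def pvMappings : List (String × List String) :=
  [ ("#geo", ["lon", "lat", "latitude", "longitude"]),
    ("#admin", ["county"]),
    ("#country", ["country"]),
    ("#date", ["year", "date"]),
    ("#funding", ["funding", "funded"]),
    ("#value", ["percentfunded"]),
    ("#org", ["organization", "funder ref", "org"]),
    ("#status", ["status"]),
    ("#sector", ["sector"]),
    ("#adm1", ["adm1", "admin1"]),
    ("#adm2", ["adm2", "admin2"]),
    ("#adm3", ["adm3", "admin3"]),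
    ("#adm4", ["adm4", "admin4"]) ]

-- ===== PORT A =====
-- Literal transliteration: nested loops mutating the (change_tag, predicted_tag) state.
def check_mapping (header : String) (predicted_tag : String) : Bool × String :=
  let header_words := PySem.Str.split₀ header
  pvMappings.foldl
    (fun (st : Bool × String) kv =>
      header_words.foldl
        (fun (st : Bool × String) word =>
          if word ∈ kv.2 then
            if st.2 ≠ kv.1 then (true, kv.1) else st
          else st)
        st)
    (false, predicted_tag)

-- ===== PORT B =====
-- Detect-then-decide: the list of matched keys first, then tag and flag read off it.
def check_mapping_alt (header : String) (predicted_tag : String) : Bool × String :=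
  let words := PySem.Str.split₀ header
  let matched := (pvMappings.filter (fun kv => words.any (fun w => decide (w ∈ kv.2)))).map Prod.fst
  match matched with
  | [] => (false, predicted_tag)
  | k :: rest => (!rest.isEmpty || (k != predicted_tag), (k :: rest).getLastD predicted_tag)

-- ===== PRECONDITION & SPEC =====
def Spec_check_mapping (header : String) (predicted_tag : String) (out : Bool × String) : Prop := out = check_mapping_alt header predicted_tag
instance (header : String) (predicted_tag : String) (out : Bool × String) : Decidable (Spec_check_mapping header predicted_tag out) := by unfold Spec_check_mapping; infer_instance

-- ===== CLAIM (what is proved, stated in full; the proofs are below) =====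
def Claim_equal_check_mapping : Prop := ∀ (header : String) (predicted_tag : String), Dom_check_mapping header predicted_tag → Spec_check_mapping header predicted_tag (check_mapping header predicted_tag)

-- ===== LEMMAS AND PROOFS =====

-- getD of the getLast? of a non-empty list does not depend on the default.
theorem pv_getD_indep {α : Type} (a : α) (l : List α) (d d' : α) :
    (a :: l).getLast?.getD d = (a :: l).getLast?.getD d' := by
  induction l generalizing a with
  | nil => rfl
  | cons b l ih => simpa [List.getLast?_cons_cons] using ih b

-- A's inner loop over the header words: if some word of hw lies in val it rewrites the
-- tag to key (setting the flag unless the tag already was key); otherwise it is a no-op.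
theorem pv_inner_eq (val : List String) (key : String) (hw : List String) (c : Bool) (t : String) :
    hw.foldl
      (fun (st : Bool × String) word =>
        if word ∈ val then
          if st.2 = key then st else (true, key)
        else st)
      (c, t)
    = if hw.any (fun w => decide (w ∈ val)) then (if t = key then (c, t) else (true, key)) else (c, t) := by
  induction hw generalizing c t with
  | nil => simp
  | cons w ws ih =>
    rw [List.foldl_cons]
    by_cases hm : w ∈ val
    · by_cases ht : t = key
      · subst ht
        rw [if_pos hm, if_pos rfl, ih]
        simp [hm]
      · rw [if_pos hm, if_neg ht, ih]
        simp [hm]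
    · rw [if_neg hm, ih]
      simp [hm]

-- A's outer loop over a table with pairwise-distinct keys, characterised by the matched keys.
theorem pv_outer_eq (hw : List String) (ms : List (String × List String))
    (hnd : (ms.map Prod.fst).Nodup) (c : Bool) (t : String) :
    ms.foldl
      (fun (st : Bool × String) kv =>
        hw.foldl
          (fun (st : Bool × String) word =>
            if word ∈ kv.2 then
              if st.2 = kv.1 then st else (true, kv.1)
            else st)
          st)
      (c, t)
    = match (ms.filter (fun kv => hw.any (fun w => decide (w ∈ kv.2)))).map Prod.fst with
      | [] => (c, t)
      | k :: rest => (c || (!rest.isEmpty || (k != t)), (k :: rest).getLastD t) := by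
  induction ms generalizing c t with
  | nil => simp
  | cons kv ms' ih =>
    simp only [List.map_cons, List.nodup_cons] at hnd
    obtain ⟨hk, hnd'⟩ := hnd
    rw [List.foldl_cons, pv_inner_eq]
    by_cases hm : (hw.any fun w => decide (w ∈ kv.2)) = true
    · simp only [List.filter_cons]
      rw [if_pos hm, if_pos hm, List.map_cons]
      by_cases ht : t = kv.1
      · subst ht
        rw [if_pos rfl, ih hnd']
        cases hms : (ms'.filter (fun kv => hw.any (fun w => decide (w ∈ kv.2)))).map Prod.fst with
        | nil => simp
        | cons k' rest' =>
          have hk' : k' ∈ (ms'.filter (fun kv => hw.any (fun w => decide (w ∈ kv.2)))).map Prod.fst := by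
            rw [hms]; exact List.mem_cons_self
          obtain ⟨x, hx, hx1⟩ := List.mem_map.1 hk'
          have hne : ¬ k' = kv.1 := by
            intro h
            exact hk (h ▸ hx1 ▸ List.mem_map_of_mem (List.mem_of_mem_filter hx))
          simp [hne]
      · rw [if_neg ht, ih hnd']
        cases hms : (ms'.filter (fun kv => hw.any (fun w => decide (w ∈ kv.2)))).map Prod.fst with
        | nil =>
          simp
          exact Or.inr (fun h => ht h.symm)
        | cons k' rest' =>
          simp
          exact pv_getD_indep k' rest' kv.1 t
    · simp only [List.filter_cons]
      rw [if_neg hm, if_neg hm, ih hnd']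

theorem pv_mappings_nodup : ((pvMappings.map Prod.fst).Nodup) := by decide

-- ===== VERDICT (by name: the statement is the Claim_ definition above) =====
theorem check_mapping_spec : Claim_equal_check_mapping := by
  intro header predicted_tag _
  unfold Spec_check_mapping check_mapping check_mapping_alt
  simp only [ne_eq, ite_not]
  rw [pv_outer_eq _ _ pv_mappings_nodup]
  cases hms : (pvMappings.filter
      (fun kv => (PySem.Str.split₀ header).any (fun w => decide (w ∈ kv.2)))).map Prod.fst with
  | nil => rfl
  | cons k rest => simp
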